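-- pv_equiv track=rewrite | github.com/yenmr/TISCalling | script/coden_usage_generator.py | gen_PWM_frames
-- ===== SOURCE A (Python) =====
-- def gen_PWM_frames(sites, seq, left_offset=-15, right_offset=10):
--     subseqs = []
--     seq_len = len(seq)
--     seq = ''.join(['N' if base not in 'ACGT' else base for base in seq])
--     for site in sites:
--         start = site + left_offset
--         end = site + right_offset
--
--         # Initialize the subsequence with 'N' padding
--         subseq = ['N'] * (right_offset - left_offset)
--
--         # Calculate the actual indices within the original sequence
--         for i in range(start, end):
--             if 0 <= i < seq_len:
--                 subseq[i - start] = seq[i]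
--
--         subseqs.append(''.join(subseq))
--
--     return subseqs
-- ===== SOURCE B (Python) =====
-- def gen_PWM_frames(sites, seq, left_offset=-15, right_offset=10):
--     L = len(seq)
--     clean = ''.join(c if c in 'ACGT' else 'N' for c in seq)
--     width = right_offset - left_offset
--     out = []
--     for site in sites:
--         start = site + left_offset
--         end = site + right_offset
--         cs = max(start, 0)
--         ce = min(end, L)
--         if cs < ce:
--             out.append('N' * (cs - start) + clean[cs:ce] + 'N' * (end - ce))
--         else:
--             out.append('N' * max(width, 0))
--     return out
-- ===== Notes on version B (the rewrite author's own statement) =====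
-- stated objective: simpler
-- what changed: Replaces the per-character window-filling loop (preallocate 'N' buffer, assign each in-range position) with one clamped slice of the cleaned sequence plus computed left/right 'N' padding counts per site.
import Mathlib
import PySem

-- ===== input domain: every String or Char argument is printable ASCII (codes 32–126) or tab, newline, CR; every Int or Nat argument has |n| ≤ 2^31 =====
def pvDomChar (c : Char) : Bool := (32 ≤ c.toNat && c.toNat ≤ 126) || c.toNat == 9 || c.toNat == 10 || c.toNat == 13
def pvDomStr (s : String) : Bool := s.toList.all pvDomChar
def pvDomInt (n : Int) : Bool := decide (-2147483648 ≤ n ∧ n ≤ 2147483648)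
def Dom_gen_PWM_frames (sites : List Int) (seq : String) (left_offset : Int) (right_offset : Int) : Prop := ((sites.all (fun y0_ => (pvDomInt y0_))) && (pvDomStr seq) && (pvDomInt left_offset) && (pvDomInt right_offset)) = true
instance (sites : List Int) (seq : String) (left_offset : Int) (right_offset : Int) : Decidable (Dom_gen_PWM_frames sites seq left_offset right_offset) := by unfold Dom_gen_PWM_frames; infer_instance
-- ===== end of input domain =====

-- B replaces A's per-character window-filling loop by one clamped slice of the cleaned
-- sequence plus computed left/right 'N' padding counts per site (objective: simpler).

-- ===== PORT A =====
-- literal transliteration of Source A; the guard 0 ≤ i < seq_len makes pyGetD exact for seq[i]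
def gen_PWM_frames (sites : List Int) (seq : String) (left_offset : Int) (right_offset : Int) : List String :=
  let seq_len : Int := PySem.Str.len seq
  let cleaned : List Char := seq.toList.map (fun base => if ¬ (base ∈ "ACGT".toList) then 'N' else base)
  sites.foldl (fun subseqs site =>
    let start := site + left_offset
    let stop := site + right_offset
    let subseq : List Char := List.replicate (right_offset - left_offset).toNat 'N'
    let subseq := (PySem.List.pyRange start stop 1).foldl (fun sb i =>
      if 0 ≤ i ∧ i < seq_len then sb.set (i - start).toNat (PySem.List.pyGetD cleaned i 'N') else sb) subseq
    subseqs ++ [String.mk subseq]) []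

-- ===== PORT B =====
-- transliteration of Source B: clamp the window to the sequence, slice, pad with 'N'
def gen_PWM_frames_alt (sites : List Int) (seq : String) (left_offset : Int) (right_offset : Int) : List String :=
  let L : Int := PySem.Str.len seq
  let clean : List Char := seq.toList.map (fun c => if c ∈ "ACGT".toList then c else 'N')
  let width := right_offset - left_offset
  sites.map (fun site =>
    let start := site + left_offset
    let stop := site + right_offset
    let cs := max start 0
    let ce := min stop L
    if cs < ce then
      String.mk (List.replicate (cs - start).toNat 'N' ++ PySem.List.slice clean (some cs) (some ce) ++ List.replicate (stop - ce).toNat 'N')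
    else
      String.mk (List.replicate (max width 0).toNat 'N'))

-- ===== PRECONDITION & SPEC =====
def Spec_gen_PWM_frames (sites : List Int) (seq : String) (left_offset : Int) (right_offset : Int) (out : List String) : Prop := out = gen_PWM_frames_alt sites seq left_offset right_offset
instance (sites : List Int) (seq : String) (left_offset : Int) (right_offset : Int) (out : List String) : Decidable (Spec_gen_PWM_frames sites seq left_offset right_offset out) := by unfold Spec_gen_PWM_frames; infer_instance

-- ===== CLAIM (what is proved, stated in full; the proofs are below) =====
def Claim_equal_gen_PWM_frames : Prop := ∀ (sites : List Int) (seq : String) (left_offset : Int) (right_offset : Int), Dom_gen_PWM_frames sites seq left_offset right_offset → Spec_gen_PWM_frames sites seq left_offset right_offset (gen_PWM_frames sites seq left_offset right_offset)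

-- ===== LEMMAS AND PROOFS =====

theorem foldl_append_singleton {α β : Type} (f : α → β) (xs : List α) (init : List β) :
    xs.foldl (fun acc s => acc ++ [f s]) init = init ++ xs.map f := by
  induction xs generalizing init with
  | nil => simp
  | cons x xs ih => simp [ih]

-- A's inner fill loop, characterised: filling positions a..stop into a buffer whose
-- already-filled prefix is `pre` yields `pre` followed by the pointwise window values.
theorem fill_loop (clean : List Char) (L : Int) (start stop : Int) :
    ∀ (n : Nat) (a : Int) (pre : List Char), start ≤ a → (stop - a).toNat = n →
      pre.length = (a - start).toNat →
      (PySem.List.pyRange a stop 1).foldl (fun sb i =>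
          if 0 ≤ i ∧ i < L then sb.set (i - start).toNat (PySem.List.pyGetD clean i 'N') else sb)
        (pre ++ List.replicate n 'N')
      = pre ++ (PySem.List.pyRange a stop 1).map
          (fun i => if 0 ≤ i ∧ i < L then PySem.List.pyGetD clean i 'N' else 'N') := by
  intro n
  induction n with
  | zero =>
      intro a pre _ hn _
      rw [PySem.List.pyRange_one_eq_nil (by omega)]
      simp
  | succ n ih =>
      intro a pre ha hn hpre
      have hlt : a < stop := by omega
      rw [PySem.List.pyRange_one_cons hlt]
      simp only [List.foldl_cons, List.map_cons]
      have hset : ∀ c : Char,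
          (pre ++ List.replicate (n+1) 'N').set (a - start).toNat c
            = (pre ++ [c]) ++ List.replicate n 'N' := by
        intro c
        rw [List.replicate_succ, List.set_append_right _ _ (by omega)]
        have : (a - start).toNat - pre.length = 0 := by omega
        simp [this]
      have step : ∀ c : Char, (if 0 ≤ a ∧ a < L then
            (pre ++ List.replicate (n+1) 'N').set (a - start).toNat (PySem.List.pyGetD clean a 'N')
          else (pre ++ List.replicate (n+1) 'N'))
          = (pre ++ [if 0 ≤ a ∧ a < L then PySem.List.pyGetD clean a 'N' else 'N']) ++ List.replicate n 'N' := by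
        intro c
        split_ifs with h
        · exact hset _
        · rw [List.replicate_succ]
          simp
      rw [step 'N', ih (a+1) (pre ++ [_]) (by omega) (by omega) (by simp; omega)]
      simp

-- window positions with no overlap give pure padding
theorem map_window_const (clean : List Char) (L a b : Int)
    (h : ∀ i : Int, a ≤ i → i < b → ¬ (0 ≤ i ∧ i < L)) :
    (PySem.List.pyRange a b 1).map
        (fun i => if 0 ≤ i ∧ i < L then PySem.List.pyGetD clean i 'N' else 'N')
      = List.replicate (b - a).toNat 'N' := by
  rw [List.eq_replicate_iff]
  constructor
  · simp [PySem.List.length_pyRange_one]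
  · intro c hc
    simp only [List.mem_map] at hc
    obtain ⟨i, hi, rfl⟩ := hc
    rw [PySem.List.mem_pyRange_one] at hi
    rw [if_neg (h i hi.1 hi.2)]

-- the in-sequence stretch of the window is a drop/take of the cleaned sequence
theorem map_window_mid (clean : List Char) (a b : Int) (_ : 0 ≤ a) (hb : b ≤ (clean.length : Int)) :
    ∀ (n : Nat) (a : Int), 0 ≤ a → (b - a).toNat = n →
      (PySem.List.pyRange a b 1).map (fun i => PySem.List.pyGetD clean i 'N')
        = (clean.drop a.toNat).take n := by
  intro n
  induction n with
  | zero =>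
      intro a _ hn
      rw [PySem.List.pyRange_one_eq_nil (by omega)]
      simp
  | succ n ih =>
      intro a ha0 hn
      have hlt : a < b := by omega
      rw [PySem.List.pyRange_one_cons hlt]
      simp only [List.map_cons]
      have hlen : a.toNat < clean.length := by omega
      rw [PySem.List.pyGetD_eq_getElem clean 'N' ha0 (by omega),
          ih (a+1) (by omega) (by omega),
          List.drop_eq_getElem_cons hlen]
      have : (a+1).toNat = a.toNat + 1 := by omega
      rw [this]
      rfl

-- per-site equality of the two constructions
theorem per_site (clean : List Char) (start stop : Int) :
    (PySem.List.pyRange start stop 1).foldl (fun sb i =>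
        if 0 ≤ i ∧ i < (clean.length : Int) then sb.set (i - start).toNat (PySem.List.pyGetD clean i 'N') else sb)
      (List.replicate (stop - start).toNat 'N')
    = (if max start 0 < min stop (clean.length : Int) then
        List.replicate (max start 0 - start).toNat 'N'
          ++ PySem.List.slice clean (some (max start 0)) (some (min stop (clean.length : Int)))
          ++ List.replicate (stop - min stop (clean.length : Int)).toNat 'N'
      else List.replicate (max (stop - start) 0).toNat 'N') := by
  have hfill := fill_loop clean (clean.length : Int) start stop (stop - start).toNat start []
    (le_refl start) rfl (by simp)
  simp only [List.nil_append] at hfill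
  rw [hfill]
  set L : Int := (clean.length : Int) with hL
  have hL0 : 0 ≤ L := by simp [hL]
  set cs : Int := max start 0 with hcs
  set ce : Int := min stop L with hce
  by_cases hcc : cs < ce
  · rw [if_pos hcc]
    rw [PySem.List.pyRange_one_append start cs stop (by omega) (by omega),
        PySem.List.pyRange_one_append cs ce stop (by omega) (by omega)]
    simp only [List.map_append]
    rw [List.append_assoc]
    congr 1
    · exact map_window_const clean L start cs (by intro i h1 h2; omega)
    congr 1
    · have hmid : ∀ i ∈ PySem.List.pyRange cs ce 1,
          (if 0 ≤ i ∧ i < L then PySem.List.pyGetD clean i 'N' else 'N')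
            = PySem.List.pyGetD clean i 'N' := by
        intro i hi
        rw [PySem.List.mem_pyRange_one] at hi
        rw [if_pos (by omega)]
      rw [List.map_congr_left hmid,
          map_window_mid clean cs ce (by omega) (by omega) (ce - cs).toNat cs (by omega) rfl,
          PySem.List.slice_toNat clean (by omega) (by omega)]
      congr 1
      omega
    · exact map_window_const clean L ce stop (by intro i h1 h2; omega)
  · rw [if_neg hcc]
    rw [map_window_const clean L start stop (by intro i h1 h2; omega)]
    congr 1
    omega

-- ===== VERDICT (by name: the statement is the Claim_ definition above) =====
theorem gen_PWM_frames_spec : Claim_equal_gen_PWM_frames := by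
  unfold Claim_equal_gen_PWM_frames
  intro sites seq left_offset right_offset _
  unfold Spec_gen_PWM_frames gen_PWM_frames gen_PWM_frames_alt
  simp only [PySem.Str.len_eq, ite_not]
  rw [foldl_append_singleton]
  simp only [List.nil_append]
  apply List.map_congr_left
  intro site _
  have hclean : (seq.toList.map (fun base => if base ∈ "ACGT".toList then base else 'N')).length
      = seq.toList.length := by simp
  have hw : right_offset - left_offset = (site + right_offset) - (site + left_offset) := by ring
  rw [hw, ← apply_ite String.mk, ← hclean]
  exact congrArg String.mk (per_site _ (site + left_offset) (site + right_offset))
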